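-- pv_equiv track=rewrite | github.com/Tahlor/genome_assembler | GenomeAssemblerTA/k_mer.py | kmers_list
-- ===== SOURCE A (Python) =====
-- def kmers_list(dna, k, alphabetic = True):
--     """
--     Return a list of all kmers in alphabetic order with repeats
--     """
--     l = []
--     for i in range(0, len(dna) - k + 1):
--         mer = dna[i:i + k]
--         l.append(mer)
--     if alphabetic:
--         l.sort()
--     return l
-- ===== SOURCE B (Python) =====
-- def kmers_list(dna, k, alphabetic=True):
--     """All k-mers of dna; ordered by LSD counting sort (ASCII buckets, least-significant
--     position first) instead of a comparison sort."""
--     mers = [dna[i:i + k] for i in range(len(dna) - k + 1)]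
--     if alphabetic:
--         pos = max(map(len, mers), default=0) - 1
--         while pos >= 0:
--             buckets = [[] for _ in range(129)]
--             for m in mers:
--                 buckets[(ord(m[pos]) if pos < len(m) else -1) + 1].append(m)
--             mers = [m for b in buckets for m in b]
--             pos -= 1
--     return mers
-- ===== Notes on version B (the rewrite author's own statement) =====
-- stated objective: alternative
-- what changed: A sorts the k-mer list with the built-in comparison sort (O(n k log n) comparisons); B orders it by an LSD radix sort: one stable counting pass over 129 ASCII buckets per character position, least-significant first.
import Mathlib
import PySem

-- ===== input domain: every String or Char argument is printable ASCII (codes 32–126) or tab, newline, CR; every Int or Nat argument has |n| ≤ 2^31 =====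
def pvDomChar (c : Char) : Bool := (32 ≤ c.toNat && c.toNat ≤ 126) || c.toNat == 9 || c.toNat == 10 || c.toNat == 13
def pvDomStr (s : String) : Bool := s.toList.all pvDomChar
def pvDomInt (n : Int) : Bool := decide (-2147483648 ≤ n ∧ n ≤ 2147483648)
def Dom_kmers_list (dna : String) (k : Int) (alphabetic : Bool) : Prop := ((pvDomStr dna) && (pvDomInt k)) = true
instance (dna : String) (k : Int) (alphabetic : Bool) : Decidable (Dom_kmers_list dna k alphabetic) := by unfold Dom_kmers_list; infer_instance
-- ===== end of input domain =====

-- B replaces A's comparison sort of the k-mers by an LSD counting sort over ASCII buckets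
-- (a stable bucket pass per character position, least-significant first); objective: alternative
-- (a timing run did not measure B faster — CPython's built-in sort runs in C).

-- ===== PORT A =====
-- l = []; for i in range(0, len(dna)-k+1): l.append(dna[i:i+k]); if alphabetic: l.sort()
def kmers_list (dna : String) (k : Int) (alphabetic : Bool) : List String :=
  let l := (PySem.List.pyRange 0 ((dna.length : Int) - k + 1)).foldl
    (fun acc i => acc ++ [PySem.Str.slice dna (some i) (some (i + k))]) []
  if alphabetic then PySem.List.sorted l (fun x => x) else l

-- ===== PORT B =====
-- bucket index of m at position pos: "(ord(m[pos]) if pos < len(m) else -1) + 1"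
def pvIdx (pos : Nat) (m : String) : Nat :=
  if h : pos < m.toList.length then (m.toList[pos]).toNat + 1 else 0

-- one counting pass: "buckets = [[] for _ in range(129)]; for m in mers: buckets[...].append(m);
-- mers = [m for b in buckets for m in b]"
def pvPass (pos : Nat) (mers : List String) : List String :=
  (mers.foldl (fun bs m => bs.modify (pvIdx pos m) (fun b => b ++ [m]))
    (List.replicate 129 [])).flatten

-- "pos = L - 1; while pos >= 0: mers = pass(mers, pos); pos -= 1"  (p passes, positions p-1 … 0)
def pvRadix : Nat → List String → List String
  | 0, mers => mers
  | p + 1, mers => pvRadix p (pvPass p mers)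

def kmers_list_alt (dna : String) (k : Int) (alphabetic : Bool) : List String :=
  let mers := (PySem.List.pyRange 0 ((dna.length : Int) - k + 1)).map
    (fun i => PySem.Str.slice dna (some i) (some (i + k)))
  if alphabetic then
    -- "max(map(len, mers), default=0)": all lengths are ≥ 0, so a fold of max from 0 is exact
    pvRadix (mers.foldl (fun a m => max a m.toList.length) 0) mers
  else mers

-- ===== PRECONDITION & SPEC =====
def Spec_kmers_list (dna : String) (k : Int) (alphabetic : Bool) (out : List String) : Prop := out = kmers_list_alt dna k alphabetic
instance (dna : String) (k : Int) (alphabetic : Bool) (out : List String) : Decidable (Spec_kmers_list dna k alphabetic out) := by unfold Spec_kmers_list; infer_instance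

-- ===== CLAIM (what is proved, stated in full; the proofs are below) =====
def Claim_equal_kmers_list : Prop := ∀ (dna : String) (k : Int) (alphabetic : Bool), Dom_kmers_list dna k alphabetic → Spec_kmers_list dna k alphabetic (kmers_list dna k alphabetic)

-- ===== LEMMAS AND PROOFS =====

-- the suffix order maintained by the LSD passes
def pvSuf (p : Nat) (a b : String) : Prop := a.toList.drop p ≤ b.toList.drop p

-- generic: a foldl that appends each element through f equals map f
theorem pv_foldl_append_eq_map {α β : Type} (f : α → β) (l : List α) (acc : List β) :
    l.foldl (fun acc i => acc ++ [f i]) acc = acc ++ l.map f := by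
  induction l generalizing acc with
  | nil => simp
  | cons x t ih => simp [List.foldl_cons, ih, List.append_assoc]

theorem pv_length_bucketFold (pos : Nat) (mers : List String) (bs : List (List String)) :
    (mers.foldl (fun bs m => bs.modify (pvIdx pos m) (fun b => b ++ [m])) bs).length
      = bs.length := by
  induction mers generalizing bs with
  | nil => rfl
  | cons m t ih => simp [List.foldl_cons, ih, List.length_modify]

theorem pv_getElem_bucketFold (pos : Nat) (mers : List String) (bs : List (List String))
    (j : Nat) (hj : j < bs.length) (hkey : ∀ m ∈ mers, pvIdx pos m < bs.length) :
    (mers.foldl (fun bs m => bs.modify (pvIdx pos m) (fun b => b ++ [m])) bs)[j]'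
        (by rw [pv_length_bucketFold]; exact hj)
      = bs[j] ++ mers.filter (fun m => pvIdx pos m == j) := by
  induction mers generalizing bs with
  | nil => simp
  | cons m t ih =>
    have hlen : (bs.modify (pvIdx pos m) (fun b => b ++ [m])).length = bs.length :=
      List.length_modify ..
    have := ih (bs.modify (pvIdx pos m) (fun b => b ++ [m])) (hlen ▸ hj)
      (fun x hx => by rw [hlen]; exact hkey x (List.mem_cons_of_mem _ hx))
    simp only [List.foldl_cons] at *
    rw [this]
    by_cases hc : pvIdx pos m = j
    · simp [hc]
    · simp [hc]

-- the bucket fold, flattened, is the concatenation of the per-bucket filters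
theorem pvPass_eq (pos : Nat) (mers : List String)
    (hkey : ∀ m ∈ mers, pvIdx pos m < 129) :
    pvPass pos mers
      = (List.range 129).flatMap (fun j => mers.filter (fun m => pvIdx pos m == j)) := by
  unfold pvPass
  have hlen : (mers.foldl (fun bs m => bs.modify (pvIdx pos m) (fun b => b ++ [m]))
      (List.replicate 129 ([] : List String))).length = 129 := by
    rw [pv_length_bucketFold]; simp
  have hB : (mers.foldl (fun bs m => bs.modify (pvIdx pos m) (fun b => b ++ [m]))
      (List.replicate 129 ([] : List String)))
      = (List.range 129).map (fun j => mers.filter (fun m => pvIdx pos m == j)) := by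
    apply List.ext_getElem
    · rw [hlen]; simp
    · intro i h1 h2
      have hi : i < 129 := hlen ▸ h1
      have := pv_getElem_bucketFold pos mers (List.replicate 129 ([] : List String)) i
        (by simpa using hi) (fun m hm => by simpa using hkey m hm)
      simp only [List.getElem_replicate, List.nil_append] at this
      rw [List.getElem_map, List.getElem_range]
      exact this
  rw [hB, List.flatMap_def]

-- flatMap congruence on members
theorem pv_flatMap_congr {α β : Type} (l : List α) (f g : α → List β)
    (h : ∀ x ∈ l, f x = g x) : l.flatMap f = l.flatMap g := by
  induction l with
  | nil => rfl
  | cons x t ih =>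
    simp only [List.flatMap_cons]
    rw [h x (List.mem_cons_self), ih (fun y hy => h y (List.mem_cons_of_mem _ hy))]

-- the concatenation of the per-key filters over a duplicate-free key list is a permutation
theorem pv_perm_flatMap_filter {α : Type} (key : α → Nat) (l : List Nat) (hn : l.Nodup)
    (xs : List α) (h : ∀ x ∈ xs, key x ∈ l) :
    (l.flatMap (fun j => xs.filter (fun x => key x == j))).Perm xs := by
  induction l generalizing xs with
  | nil =>
    have : xs = [] := List.eq_nil_iff_forall_not_mem.mpr (fun x hx => by simpa using h x hx)
    simp [this]
  | cons c t ih =>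
    have hc : c ∉ t := (List.nodup_cons.mp hn).1
    have hnt : t.Nodup := (List.nodup_cons.mp hn).2
    simp only [List.flatMap_cons]
    have hrw : t.flatMap (fun j => xs.filter (fun x => key x == j))
        = t.flatMap (fun j => (xs.filter (fun x => !(key x == c))).filter
            (fun x => key x == j)) := by
      apply pv_flatMap_congr
      intro j hj
      rw [List.filter_filter]
      apply List.filter_congr
      intro x _
      by_cases hkx : key x = j
      · have hne : ¬ (j = c) := fun hjc => hc (hjc ▸ hj)
        simp [hkx, hne]
      · simp [hkx]
    rw [hrw]
    have hperm := ih hnt (xs.filter (fun x => !(key x == c)))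
      (fun x hx => by
        have hx' := List.of_mem_filter hx
        have hmem := h x (List.mem_of_mem_filter hx)
        simp only [Bool.not_eq_eq_eq_not, Bool.not_true, beq_eq_false_iff_ne] at hx'
        rcases List.mem_cons.mp hmem with h1 | h1
        · exact absurd h1 hx'
        · exact h1)
    exact (List.Perm.append_left _ hperm).trans (List.filter_append_perm _ xs)

-- character facts used to compare suffixes through the bucket index
theorem pv_char_eq_of_toNat_eq {a b : Char} (h : a.toNat = b.toNat) : a = b := by
  apply Char.ext
  exact UInt32.toBitVec_inj.mp (BitVec.toNat_inj.mp h)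

theorem pv_cons_le_cons {a : Char} {t1 t2 : List Char} (h : t1 ≤ t2) :
    (a :: t1) ≤ (a :: t2) := by
  rcases lt_or_eq_of_le h with hlt | heq
  · exact le_of_lt (List.Lex.cons hlt)
  · rw [heq]

theorem pv_nil_le (l : List Char) : ([] : List Char) ≤ l := by
  cases l with
  | nil => exact le_refl _
  | cons a t => exact le_of_lt List.Lex.nil

theorem pv_suf_of_idx_eq {pos : Nat} {a b : String}
    (hidx : pvIdx pos a = pvIdx pos b) (hsuf : pvSuf (pos + 1) a b) : pvSuf pos a b := by
  unfold pvSuf at *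
  unfold pvIdx at hidx
  by_cases ha : pos < a.toList.length <;> by_cases hb : pos < b.toList.length
  · simp only [ha, hb, dif_pos] at hidx
    have hchar : a.toList[pos] = b.toList[pos] :=
      pv_char_eq_of_toNat_eq (by omega)
    rw [List.drop_eq_getElem_cons ha, List.drop_eq_getElem_cons hb, ← hchar]
    exact pv_cons_le_cons hsuf
  · rw [dif_pos ha, dif_neg hb] at hidx
    exact absurd hidx (Nat.succ_ne_zero _)
  · rw [dif_neg ha, dif_pos hb] at hidx
    exact absurd hidx.symm (Nat.succ_ne_zero _)
  · rw [List.drop_eq_nil_of_le (by omega), List.drop_eq_nil_of_le (by omega)]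

theorem pv_suf_of_idx_lt {pos : Nat} {a b : String}
    (hidx : pvIdx pos a < pvIdx pos b) : pvSuf pos a b := by
  unfold pvSuf
  unfold pvIdx at hidx
  by_cases hb : pos < b.toList.length
  · by_cases ha : pos < a.toList.length
    · simp only [ha, hb, dif_pos] at hidx
      have hchar : a.toList[pos] < b.toList[pos] := by
        have h3 : a.toList[pos].toNat < b.toList[pos].toNat := by omega
        exact Char.lt_def.mpr h3
      rw [List.drop_eq_getElem_cons ha, List.drop_eq_getElem_cons hb]
      exact le_of_lt (List.Lex.rel hchar)
    · rw [List.drop_eq_nil_of_le (by omega)]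
      exact pv_nil_le _
  · rw [dif_neg hb] at hidx
    exact absurd hidx (Nat.not_lt_zero _)

-- one pass: a permutation that upgrades suffix-sortedness by one position
theorem pvPass_perm (pos : Nat) (mers : List String)
    (hkey : ∀ m ∈ mers, pvIdx pos m < 129) : (pvPass pos mers).Perm mers := by
  rw [pvPass_eq pos mers hkey]
  exact pv_perm_flatMap_filter (pvIdx pos) (List.range 129) (List.nodup_range)
    mers (fun m hm => List.mem_range.mpr (hkey m hm))

theorem pvPass_pairwise (pos : Nat) (mers : List String)
    (hkey : ∀ m ∈ mers, pvIdx pos m < 129)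
    (hp : List.Pairwise (pvSuf (pos + 1)) mers) :
    List.Pairwise (pvSuf pos) (pvPass pos mers) := by
  rw [pvPass_eq pos mers hkey]
  rw [List.pairwise_flatMap]
  constructor
  · intro j _
    have hf : List.Pairwise (pvSuf (pos + 1)) (mers.filter (fun m => pvIdx pos m == j)) :=
      hp.filter _
    refine hf.imp_of_mem ?_
    intro a b ha hb hab
    have hja : pvIdx pos a = j := by simpa using (List.of_mem_filter ha)
    have hjb : pvIdx pos b = j := by simpa using (List.of_mem_filter hb)
    exact pv_suf_of_idx_eq (hja.trans hjb.symm) hab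
  · refine List.pairwise_lt_range.imp_of_mem ?_
    intro j1 j2 _ _ hlt x hx y hy
    have hjx : pvIdx pos x = j1 := by simpa using (List.of_mem_filter hx)
    have hjy : pvIdx pos y = j2 := by simpa using (List.of_mem_filter hy)
    exact pv_suf_of_idx_lt (by omega)

-- the radix loop: a permutation, sorted from position 0 at the end
theorem pvRadix_spec (p : Nat) (mers : List String)
    (hchar : ∀ m ∈ mers, ∀ c ∈ m.toList, c.toNat < 128)
    (hp : List.Pairwise (pvSuf p) mers) :
    (pvRadix p mers).Perm mers ∧ List.Pairwise (pvSuf 0) (pvRadix p mers) := by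
  induction p generalizing mers with
  | zero => exact ⟨List.Perm.refl _, hp⟩
  | succ q ih =>
    have hkey : ∀ m ∈ mers, pvIdx q m < 129 := by
      intro m hm
      unfold pvIdx
      by_cases h : q < m.toList.length
      · simp only [h, dif_pos]
        have := hchar m hm (m.toList[q]) (List.getElem_mem h)
        omega
      · rw [dif_neg h]
        omega
    have hperm := pvPass_perm q mers hkey
    have hpw := pvPass_pairwise q mers hkey hp
    have hchar' : ∀ m ∈ pvPass q mers, ∀ c ∈ m.toList, c.toNat < 128 :=
      fun m hm => hchar m (hperm.mem_iff.mp hm)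
    obtain ⟨hperm2, hpw2⟩ := ih (pvPass q mers) hchar' hpw
    exact ⟨hperm2.trans hperm, hpw2⟩

theorem pv_foldl_max_ge_init (l : List String) (a : Nat) :
    a ≤ l.foldl (fun a m => max a m.toList.length) a := by
  induction l generalizing a with
  | nil => simp
  | cons y s ihs => exact le_trans (le_max_left _ _) (ihs _)

theorem pv_le_foldl_max (l : List String) (a : Nat) {m : String} (hm : m ∈ l) :
    m.toList.length ≤ l.foldl (fun a m => max a m.toList.length) a := by
  induction l generalizing a with
  | nil => cases hm
  | cons x t ih =>
    rcases List.mem_cons.mp hm with h | h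
    · subst h
      exact le_trans (le_max_right a _) (pv_foldl_max_ge_init t _)
    · exact ih _ h

-- ===== VERDICT (by name: the statement is the Claim_ definition above) =====
theorem kmers_list_spec : Claim_equal_kmers_list := by
  intro dna k alphabetic hdom
  unfold Spec_kmers_list kmers_list kmers_list_alt
  rw [pv_foldl_append_eq_map, List.nil_append]
  set mers := (PySem.List.pyRange 0 ((dna.length : Int) - k + 1)).map
    (fun i => PySem.Str.slice dna (some i) (some (i + k))) with hmers
  cases alphabetic with
  | false => simp
  | true =>
    have hchar : ∀ m ∈ mers, ∀ c ∈ m.toList, c.toNat < 128 := by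
      intro m hm c hc
      obtain ⟨i, _, rfl⟩ := List.mem_map.mp hm
      rw [PySem.Str.toList_slice, PySem.Chars.slice_eq_listSlice] at hc
      have hcd : c ∈ dna.toList := PySem.List.mem_of_mem_slice _ _ _ hc
      have hdc : pvDomChar c = true := by
        have hps : pvDomStr dna = true := by
          unfold Dom_kmers_list at hdom
          simp only [Bool.and_eq_true] at hdom
          exact hdom.1
        exact List.all_eq_true.mp hps c hcd
      unfold pvDomChar at hdc
      simp only [Bool.or_eq_true, Bool.and_eq_true, decide_eq_true_eq, beq_iff_eq] at hdc
      omega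
    set L := mers.foldl (fun a m => max a m.toList.length) 0 with hL
    have hinit : List.Pairwise (pvSuf L) mers := by
      apply List.pairwise_of_forall_mem_list
      intro a ha b hb
      unfold pvSuf
      rw [List.drop_eq_nil_of_le (pv_le_foldl_max mers 0 ha),
        List.drop_eq_nil_of_le (pv_le_foldl_max mers 0 hb)]
    obtain ⟨hperm, hpw⟩ := pvRadix_spec L mers hchar hinit
    apply PySem.List.sorted_id_eq_of_perm_of_pairwise _ _ hperm
    refine hpw.imp ?_
    intro a b hab
    unfold pvSuf at hab
    simp only [List.drop_zero] at hab
    exact String.le_iff_toList_le.mpr hab
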